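-- pv_equiv track=rewrite | github.com/danieleschmidt/vid-diffusion-benchmark-suite | src/vid_diffusion_bench/research/multimodal_consistency_framework.py | _extract_semantic_tags
-- ===== SOURCE A (Python) =====
-- from typing import Dict, List, Any, Optional, Tuple, Callable, Union
--
-- def _extract_semantic_tags(text: str) -> List[str]:
--     """Extract semantic tags from text."""
--
--     common_tags = [
--         "person", "animal", "object", "action", "location", "color",
--         "emotion", "time", "weather", "movement", "interaction"
--     ]
--
--     text_lower = text.lower()
--     tags = []
--
--     for tag in common_tags:
--         # Simple keyword matching
--         if tag in text_lower:
--             tags.append(tag)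
--         elif tag == "person" and any(word in text_lower for word in ["man", "woman", "child", "people"]):
--             tags.append(tag)
--         elif tag == "animal" and any(word in text_lower for word in ["cat", "dog", "bird", "horse"]):
--             tags.append(tag)
--         elif tag == "action" and any(word in text_lower for word in ["running", "jumping", "walking", "dancing"]):
--             tags.append(tag)
--
--     return tags
-- ===== SOURCE B (Python) =====
-- from typing import List
--
-- # Flat keyword -> tag index: each tag matches on itself, plus synonyms for
-- # person / animal / action.
-- _KEYWORD_TAGS = [
--     ("person", "person"), ("man", "person"), ("woman", "person"),
--     ("child", "person"), ("people", "person"),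
--     ("animal", "animal"), ("cat", "animal"), ("dog", "animal"),
--     ("bird", "animal"), ("horse", "animal"),
--     ("object", "object"),
--     ("action", "action"), ("running", "action"), ("jumping", "action"),
--     ("walking", "action"), ("dancing", "action"),
--     ("location", "location"), ("color", "color"), ("emotion", "emotion"),
--     ("time", "time"), ("weather", "weather"), ("movement", "movement"),
--     ("interaction", "interaction"),
-- ]
--
-- _TAG_ORDER = [
--     "person", "animal", "object", "action", "location", "color",
--     "emotion", "time", "weather", "movement", "interaction"
-- ]
--
-- def _extract_semantic_tags(text: str) -> List[str]:
--     """Extract semantic tags by a single scan over the text's positions."""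
--     t = text.lower()
--     matched = set()
--     for i in range(len(t) + 1):
--         for kw, tag in _KEYWORD_TAGS:
--             if t.startswith(kw, i):
--                 matched.add(tag)
--     return [tag for tag in _TAG_ORDER if tag in matched]
-- ===== Notes on version B (the rewrite author's own statement) =====
-- stated objective: alternative
-- what changed: Replaces A's per-tag substring tests with special-cased elif branches by a single scan over the text's character positions against a flat keyword->tag index, collecting matched tags in a set and finally emitting them in the canonical tag order.
import Mathlib
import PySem

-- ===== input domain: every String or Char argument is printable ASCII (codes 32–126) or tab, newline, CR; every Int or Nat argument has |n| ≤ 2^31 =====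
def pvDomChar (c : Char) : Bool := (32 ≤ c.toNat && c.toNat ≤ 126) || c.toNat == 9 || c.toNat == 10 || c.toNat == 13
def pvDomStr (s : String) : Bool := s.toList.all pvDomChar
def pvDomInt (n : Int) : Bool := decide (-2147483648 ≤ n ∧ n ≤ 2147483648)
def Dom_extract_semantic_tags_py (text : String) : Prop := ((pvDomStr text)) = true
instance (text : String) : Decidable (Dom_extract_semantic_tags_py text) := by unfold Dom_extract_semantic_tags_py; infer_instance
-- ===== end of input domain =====

-- B replaces A's per-tag if/elif substring tests by one scan over the text's positions
-- against a flat keyword->tag index, collecting matched tags in a set (alternative decomposition).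

-- ===== PORT A =====
def pvCommonTags : List String :=
  ["person", "animal", "object", "action", "location", "color",
   "emotion", "time", "weather", "movement", "interaction"]

def extract_semantic_tags_py (text : String) : List String :=
  pvCommonTags.foldl (fun tags tag =>
    if PySem.Str.isIn tag (PySem.Str.lower text) then tags ++ [tag]
    else if tag == "person" && (["man", "woman", "child", "people"].any (fun w => PySem.Str.isIn w (PySem.Str.lower text))) then tags ++ [tag]
    else if tag == "animal" && (["cat", "dog", "bird", "horse"].any (fun w => PySem.Str.isIn w (PySem.Str.lower text))) then tags ++ [tag]
    else if tag == "action" && (["running", "jumping", "walking", "dancing"].any (fun w => PySem.Str.isIn w (PySem.Str.lower text))) then tags ++ [tag]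
    else tags) []

-- ===== PORT B =====
def pvKeywordTags : List (String × String) :=
  [("person", "person"), ("man", "person"), ("woman", "person"),
   ("child", "person"), ("people", "person"),
   ("animal", "animal"), ("cat", "animal"), ("dog", "animal"),
   ("bird", "animal"), ("horse", "animal"),
   ("object", "object"),
   ("action", "action"), ("running", "action"), ("jumping", "action"),
   ("walking", "action"), ("dancing", "action"),
   ("location", "location"), ("color", "color"), ("emotion", "emotion"),
   ("time", "time"), ("weather", "weather"), ("movement", "movement"),
   ("interaction", "interaction")]

def pvTagOrder : List String :=
  ["person", "animal", "object", "action", "location", "color",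
   "emotion", "time", "weather", "movement", "interaction"]

def extract_semantic_tags_py_alt (text : String) : List String :=
  let t := PySem.Str.lower text
  -- t.startswith(kw, i) is ported as a prefix test on t's character list dropped at i
  -- (exact here: every i produced by the range is nonnegative)
  let matched : PySem.Set String :=
    (PySem.List.pyRange 0 ((t.toList.length : Int) + 1) 1).foldl
      (fun m i => pvKeywordTags.foldl
        (fun m p =>
          if PySem.Chars.startswith (t.toList.drop i.toNat) p.1.toList then PySem.Set.add m p.2 else m) m)
      PySem.Set.empty
  pvTagOrder.filter (fun tag => PySem.Set.contains matched tag)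

-- ===== PRECONDITION & SPEC =====
def Spec_extract_semantic_tags_py (text : String) (out : List String) : Prop := out = extract_semantic_tags_py_alt text
instance (text : String) (out : List String) : Decidable (Spec_extract_semantic_tags_py text out) := by unfold Spec_extract_semantic_tags_py; infer_instance

-- ===== CLAIM =====
def Claim_equal_extract_semantic_tags_py : Prop := ∀ (text : String), Dom_extract_semantic_tags_py text → Spec_extract_semantic_tags_py text (extract_semantic_tags_py text)

-- ===== LEMMAS AND PROOFS =====

-- membership in the inner per-position fold (conditionally adding tags to the set)
theorem pv_mem_foldl_addIf {α : Type} (l : List α) (c : α → Bool) (f : α → String)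
    (s : PySem.Set String) (x : String) :
    x ∈ l.foldl (fun m a => if c a then PySem.Set.add m (f a) else m) s ↔
      x ∈ s ∨ ∃ a ∈ l, c a = true ∧ x = f a := by
  induction l generalizing s with
  | nil => simp
  | cons a l ih =>
    simp only [List.foldl_cons, List.mem_cons]
    by_cases h : c a = true
    · rw [if_pos h, ih]
      simp only [PySem.Set.mem_add]
      constructor
      · rintro ((hs | rfl) | ⟨b, hb, hc, rfl⟩)
        · exact Or.inl hs
        · exact Or.inr ⟨a, Or.inl rfl, h, rfl⟩
        · exact Or.inr ⟨b, Or.inr hb, hc, rfl⟩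
      · rintro (hs | ⟨b, (rfl | hb), hc, rfl⟩)
        · exact Or.inl (Or.inl hs)
        · exact Or.inl (Or.inr rfl)
        · exact Or.inr ⟨b, hb, hc, rfl⟩
    · rw [if_neg h, ih]
      constructor
      · rintro (hs | ⟨b, hb, hc, rfl⟩)
        · exact Or.inl hs
        · exact Or.inr ⟨b, Or.inr hb, hc, rfl⟩
      · rintro (hs | ⟨b, (rfl | hb), hc, rfl⟩)
        · exact Or.inl hs
        · exact (h hc).elim
        · exact Or.inr ⟨b, hb, hc, rfl⟩

-- membership in the full position scan
theorem pv_mem_scan (tl : List Char) (kws : List (String × String)) (is : List Int)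
    (s : PySem.Set String) (x : String) :
    x ∈ is.foldl
        (fun m i => kws.foldl
          (fun m p => if PySem.Chars.startswith (tl.drop i.toNat) p.1.toList then PySem.Set.add m p.2 else m) m) s ↔
      x ∈ s ∨ ∃ i ∈ is, ∃ p ∈ kws, PySem.Chars.startswith (tl.drop i.toNat) p.1.toList = true ∧ x = p.2 := by
  induction is generalizing s with
  | nil => simp
  | cons i is ih =>
    simp only [List.foldl_cons, List.mem_cons]
    rw [ih, pv_mem_foldl_addIf]
    constructor
    · rintro ((hs | ⟨p, hp, hc, rfl⟩) | ⟨j, hj, p, hp, hc, rfl⟩)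
      · exact Or.inl hs
      · exact Or.inr ⟨i, Or.inl rfl, p, hp, hc, rfl⟩
      · exact Or.inr ⟨j, Or.inr hj, p, hp, hc, rfl⟩
    · rintro (hs | ⟨j, (rfl | hj), p, hp, hc, rfl⟩)
      · exact Or.inl (Or.inl hs)
      · exact Or.inl (Or.inr ⟨p, hp, hc, rfl⟩)
      · exact Or.inr ⟨j, hj, p, hp, hc, rfl⟩

-- a keyword matches at some scanned position iff it is a substring
theorem pv_exists_pos_iff_isIn (tl kw : List Char) :
    (∃ i ∈ PySem.List.pyRange 0 ((tl.length : Int) + 1) 1,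
        PySem.Chars.startswith (tl.drop i.toNat) kw = true) ↔
      PySem.Chars.isIn kw tl = true := by
  rw [← PySem.Chars.exists_prefix_drop_iff_isIn]
  constructor
  · rintro ⟨i, _, hsw⟩
    exact ⟨i.toNat, (PySem.Chars.startswith_iff _ _).1 hsw⟩
  · rintro ⟨j, hj⟩
    by_cases h : j ≤ tl.length
    · refine ⟨(j : Int), ?_, ?_⟩
      · rw [PySem.List.mem_pyRange_one]
        refine ⟨Int.natCast_nonneg j, by push_cast; omega⟩
      · rw [Int.toNat_natCast]
        exact (PySem.Chars.startswith_iff _ _).2 hj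
    · have hnil : tl.drop j = [] := List.drop_eq_nil_of_le (by omega)
      rw [hnil] at hj
      have hkw : kw = [] := List.prefix_nil.mp hj
      refine ⟨0, ?_, ?_⟩
      · rw [PySem.List.mem_pyRange_one]
        exact ⟨le_refl 0, by positivity⟩
      · subst hkw
        exact (PySem.Chars.startswith_iff _ _).2 (List.nil_prefix)
  
-- the set built by the scan contains exactly the tags of the matching keywords
theorem pv_contains_scan (tl : List Char) (tag : String) :
    PySem.Set.contains
      ((PySem.List.pyRange 0 ((tl.length : Int) + 1) 1).foldl
        (fun m i => pvKeywordTags.foldl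
          (fun m p => if PySem.Chars.startswith (tl.drop i.toNat) p.1.toList then PySem.Set.add m p.2 else m) m)
        PySem.Set.empty) tag
    = pvKeywordTags.any (fun p => p.2 == tag && PySem.Chars.isIn p.1.toList tl) := by
  rw [Bool.eq_iff_iff, PySem.Set.contains_iff, pv_mem_scan, List.any_eq_true]
  constructor
  · rintro (hs | ⟨i, hi, p, hp, hc, rfl⟩)
    · exact absurd hs (List.not_mem_nil)
    · refine ⟨p, hp, ?_⟩
      rw [Bool.and_eq_true, beq_iff_eq]
      exact ⟨rfl, (pv_exists_pos_iff_isIn tl p.1.toList).1 ⟨i, hi, hc⟩⟩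
  · rintro ⟨p, hp, hc⟩
    rw [Bool.and_eq_true, beq_iff_eq] at hc
    obtain ⟨i, hi, hsw⟩ := (pv_exists_pos_iff_isIn tl p.1.toList).2 hc.2
    exact Or.inr ⟨i, hi, p, hp, hsw, hc.1.symm⟩

-- ===== VERDICT =====
theorem extract_semantic_tags_py_spec : Claim_equal_extract_semantic_tags_py := by
  intro text _
  unfold Spec_extract_semantic_tags_py extract_semantic_tags_py extract_semantic_tags_py_alt
  have hstep : ∀ (t : String),
      (fun (tags : List String) (tag : String) =>
        if PySem.Str.isIn tag t then tags ++ [tag]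
        else if tag == "person" && (["man", "woman", "child", "people"].any (fun w => PySem.Str.isIn w t)) then tags ++ [tag]
        else if tag == "animal" && (["cat", "dog", "bird", "horse"].any (fun w => PySem.Str.isIn w t)) then tags ++ [tag]
        else if tag == "action" && (["running", "jumping", "walking", "dancing"].any (fun w => PySem.Str.isIn w t)) then tags ++ [tag]
        else tags)
      = fun tags tag =>
        if (PySem.Str.isIn tag t
            || tag == "person" && (["man", "woman", "child", "people"].any (fun w => PySem.Str.isIn w t))
            || tag == "animal" && (["cat", "dog", "bird", "horse"].any (fun w => PySem.Str.isIn w t))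
            || tag == "action" && (["running", "jumping", "walking", "dancing"].any (fun w => PySem.Str.isIn w t)))
        then tags ++ [tag] else tags := by
    intro t; funext tags tag
    cases hb1 : PySem.Str.isIn tag t <;>
      cases hb2 : (["man", "woman", "child", "people"].any (fun w => PySem.Str.isIn w t)) <;>
      cases hb3 : (["cat", "dog", "bird", "horse"].any (fun w => PySem.Str.isIn w t)) <;>
      cases hb4 : (["running", "jumping", "walking", "dancing"].any (fun w => PySem.Str.isIn w t)) <;>
      simp only [Bool.and_true, Bool.and_false, Bool.or_false,
        Bool.true_or, Bool.false_or, if_true, if_false, Bool.false_eq_true, Bool.or_self] <;>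
      split_ifs <;> simp_all
  rw [hstep]
  rw [PySem.List.foldl_append_if_eq_filter]
  simp only []
  rw [List.filter_congr (fun tag _ => pv_contains_scan (PySem.Str.lower text).toList tag)]
  unfold pvCommonTags pvTagOrder pvKeywordTags
  simp only [List.filter_cons, List.filter_nil, List.any_cons, List.any_nil,
    PySem.Str.isIn, String.reduceBEq, beq_self_eq_true, Bool.true_and, Bool.false_and,
    Bool.or_false, Bool.false_or, List.nil_append]
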